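-- pv_equiv track=rewrite | github.com/panda-piglet/CSC1005_Homework | AS2/AS2_Q4.py | group_rotated_words
-- ===== SOURCE A (Python) =====
-- def generate_rotated_words(word):
--     result = [word]
--     rotated_word = word
--     for i in range(len(word) - 1):
--         rotated_word = rotated_word[1::] + rotated_word[0]
--         result.append(rotated_word)
--     return result
--
-- def group_rotated_words(lis):
--     result = []
--     for word in lis:
--         if len(result) == 0:
--             result.append(sorted(generate_rotated_words(word)))
--         else:
--             for group in result:
--                 if word in group:
--                     break
--             else:
--                 result.append(sorted(generate_rotated_words(word)))
--     return result
-- ===== SOURCE B (Python) =====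
-- def group_rotated_words(lis):
--     seen = set()
--     result = []
--     for word in lis:
--         rots = sorted(word[i:] + word[:i] for i in range(len(word))) or [word]
--         key = rots[0]  # minimal rotation = canonical representative of the class
--         if key not in seen:
--             seen.add(key)
--             result.append(rots)
--     return result
-- ===== Notes on version B (the rewrite author's own statement) =====
-- stated objective: faster
-- what changed: B replaces A's per-word linear scan through every stored group's member list by a set of canonical (lexicographically minimal) rotations, so class membership becomes one O(1) expected set lookup per word instead of scanning all groups.
import Mathlib
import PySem

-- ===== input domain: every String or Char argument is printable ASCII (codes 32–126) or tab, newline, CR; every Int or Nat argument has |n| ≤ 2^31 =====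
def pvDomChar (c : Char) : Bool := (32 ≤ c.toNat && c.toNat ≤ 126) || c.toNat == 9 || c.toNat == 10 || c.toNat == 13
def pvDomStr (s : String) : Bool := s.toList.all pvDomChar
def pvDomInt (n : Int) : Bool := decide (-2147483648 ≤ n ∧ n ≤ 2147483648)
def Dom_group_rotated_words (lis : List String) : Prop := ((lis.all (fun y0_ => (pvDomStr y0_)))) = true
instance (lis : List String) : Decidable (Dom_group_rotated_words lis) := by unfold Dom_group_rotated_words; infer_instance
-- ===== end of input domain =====

-- B replaces A's linear scan over all groups per word by a set of canonical (minimal)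
-- rotations, giving O(1) class lookup per word instead of scanning every group's members.

-- ===== PORT A =====
-- generate_rotated_words: result = [word]; repeat len-1 times: rotated = rotated[1:] + rotated[0]
-- (rotated[0] is in range on every executed iteration, so the '?' default is never used)
-- one iteration of the rotation loop: result.append(rotated); rotated = rotated[1:] + rotated[0]
def genStep (st : List String × String) : List String × String :=
  let r := String.ofList (PySem.List.slice st.2.toList (some 1) none ++ [st.2.toList.headD ' '])
  (st.1 ++ [r], r)

def generate_rotated_words (word : String) : List String :=
  ((PySem.List.pyRange 0 (PySem.Str.len word - 1) 1).foldl
    (fun st _ => genStep st) ([word], word)).1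

-- the inner 'for group in result: if word in group: break / else: append' search
def group_member : List (List String) → String → Bool
  | [], _ => false
  | g :: gs, w => if w ∈ g then true else group_member gs w

def group_rotated_words (lis : List String) : List (List String) :=
  lis.foldl
    (fun result word =>
      if result.length = 0 then
        result ++ [PySem.List.sorted (generate_rotated_words word) (fun x => x) false]
      else if group_member result word then result
      else result ++ [PySem.List.sorted (generate_rotated_words word) (fun x => x) false])
    []

-- ===== PORT B =====
-- rots = sorted(word[i:] + word[:i] for i in range(len(word))) or [word]
def alt_rotations (word : String) : List String :=
  let s := PySem.List.sorted
    ((PySem.List.pyRange 0 (PySem.Str.len word) 1).map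
      (fun i => String.ofList (PySem.List.slice word.toList (some i) none ++
                               PySem.List.slice word.toList none (some i))))
    (fun x => x) false
  if s = [] then [word] else s

def group_rotated_words_alt (lis : List String) : List (List String) :=
  (lis.foldl
    (fun (st : PySem.Set String × List (List String)) word =>
      let rots := alt_rotations word
      let key := PySem.List.pyGetD rots 0 ""   -- rots[0]; rots is never empty
      if st.1.contains key then st
      else (st.1.add key, st.2 ++ [rots]))
    ((PySem.Set.empty : PySem.Set String), [])).2

-- ===== PRECONDITION & SPEC =====
def Spec_group_rotated_words (lis : List String) (out : List (List String)) : Prop := out = group_rotated_words_alt lis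
instance (lis : List String) (out : List (List String)) : Decidable (Spec_group_rotated_words lis out) := by unfold Spec_group_rotated_words; infer_instance

-- ===== CLAIM (what is proved, stated in full; the proofs are below) =====
def Claim_equal_group_rotated_words : Prop := ∀ (lis : List String), Dom_group_rotated_words lis → Spec_group_rotated_words lis (group_rotated_words lis)

-- ===== LEMMAS AND PROOFS =====

-- the list of rotations of w, i = 0 .. len-1
def rotBase (w : String) : List String :=
  (List.range w.toList.length).map (fun i => String.ofList (w.toList.rotate i))

-- the canonical key B maintains
def rotKey (w : String) : String := PySem.List.pyGetD (alt_rotations w) 0 ""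

-- A's step of the result loop / B's step of the (seen, result) loop, as named functions
def stepA (result : List (List String)) (word : String) : List (List String) :=
  if result.length = 0 then
    result ++ [PySem.List.sorted (generate_rotated_words word) (fun x => x) false]
  else if group_member result word then result
  else result ++ [PySem.List.sorted (generate_rotated_words word) (fun x => x) false]

def stepB (st : PySem.Set String × List (List String)) (word : String) :
    PySem.Set String × List (List String) :=
  let rots := alt_rotations word
  let key := PySem.List.pyGetD rots 0 ""
  if st.1.contains key then st else (st.1.add key, st.2 ++ [rots])

lemma foldl_ignore {α β : Type} (f : β → β) (xs : List α) (b : β) :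
    xs.foldl (fun acc _ => f acc) b = f^[xs.length] b := by
  induction xs generalizing b with
  | nil => rfl
  | cons x t ih => simp [List.foldl_cons, ih, Function.iterate_succ_apply]

lemma rot1_rot (l : List Char) (k : Nat) (hk : k + 1 ≤ l.length) :
    genStep (L, String.ofList (l.rotate k)) =
      (L ++ [String.ofList (l.rotate (k + 1))], String.ofList (l.rotate (k + 1))) := by
  have hk' : k < l.length := hk
  have hr : String.ofList (PySem.List.slice (String.ofList (l.rotate k)).toList (some 1) none ++
      [(String.ofList (l.rotate k)).toList.headD ' ']) = String.ofList (l.rotate (k + 1)) := by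
    rw [String.toList_ofList, PySem.List.slice_from_one,
      List.rotate_eq_drop_append_take (Nat.le_of_lt hk'),
      List.rotate_eq_drop_append_take hk]
    congr 1
    simp only [List.drop_eq_getElem_cons hk', List.cons_append, List.tail_cons,
      List.headD_cons, List.take_add_one, List.getElem?_eq_getElem hk', Option.toList_some]
    simp [List.append_assoc]
  unfold genStep
  rw [hr]

lemma genA_loop (w : String) (m : Nat) (hm : m ≤ w.toList.length - 1) :
    genStep^[m] ([w], w) =
      ((List.range (m + 1)).map (fun i => String.ofList (w.toList.rotate i)),
        String.ofList (w.toList.rotate m)) := by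
  induction m with
  | zero => simp
  | succ m ih =>
      have hm' : m ≤ w.toList.length - 1 := by omega
      have hpos : 0 < w.toList.length := by omega
      have hlen : m + 1 ≤ w.toList.length := by omega
      rw [Function.iterate_succ_apply', ih hm', rot1_rot w.toList m hlen,
        List.range_succ (n := m + 1), List.map_append]
      simp

lemma genA_eq (w : String) :
    generate_rotated_words w = if w.toList.length = 0 then [w] else rotBase w := by
  unfold generate_rotated_words
  rcases Nat.eq_zero_or_pos w.toList.length with h0 | hpos
  · have h1 : PySem.Str.len w - 1 = -1 := by rw [PySem.Str.len_eq, h0]; rfl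
    rw [h1, if_pos h0]
    rfl
  · have hn : PySem.Str.len w - 1 = ((w.toList.length - 1 : Nat) : Int) := by
      rw [PySem.Str.len_eq]; omega
    rw [hn, PySem.List.pyRange_zero_natCast, foldl_ignore genStep,
      List.length_map, List.length_range, genA_loop w (w.toList.length - 1) (le_refl _),
      if_neg (Nat.pos_iff_ne_zero.mp hpos)]
    unfold rotBase
    have hsf : w.toList.length - 1 + 1 = w.toList.length := by omega
    rw [hsf]

lemma altB_eq (w : String) :
    alt_rotations w =
      PySem.List.sorted (if w.toList.length = 0 then [w] else rotBase w) (fun x => x) false := by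
  unfold alt_rotations
  have hmap : (PySem.List.pyRange 0 (PySem.Str.len w) 1).map
      (fun i => String.ofList (PySem.List.slice w.toList (some i) none ++
        PySem.List.slice w.toList none (some i))) = rotBase w := by
    rw [PySem.Str.len_eq, PySem.List.pyRange_zero_natCast, List.map_map]
    unfold rotBase
    apply List.map_congr_left
    intro i hi
    have hi' : i ≤ w.toList.length := Nat.le_of_lt (List.mem_range.mp hi)
    simp only [Function.comp_apply, PySem.List.slice_from_natCast, PySem.List.slice_to_natCast,
      List.rotate_eq_drop_append_take hi']
  rw [hmap]
  rcases Nat.eq_zero_or_pos w.toList.length with h0 | hpos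
  · have hrb : rotBase w = [] := by unfold rotBase; rw [h0]; rfl
    have hnil : PySem.List.sorted ([] : List String) (fun x => x) false = [] := rfl
    have hs : PySem.List.sorted ([w]) (fun x : String => x) false = [w] :=
      PySem.List.sorted_eq_self_of_pairwise _ _ (List.pairwise_singleton _ _)
    rw [hrb, hnil, if_pos rfl, if_pos h0, hs]
  · have hne : PySem.List.sorted (rotBase w) (fun x : String => x) false ≠ [] := by
      intro h
      have hl := PySem.List.length_sorted (rotBase w) (fun x : String => x) false
      rw [h] at hl
      unfold rotBase at hl
      simp at hl
      rw [hl] at hpos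
      simp at hpos
    rw [if_neg hne, if_neg (Nat.pos_iff_ne_zero.mp hpos)]

lemma sortedA_eq_altB (w : String) :
    PySem.List.sorted (generate_rotated_words w) (fun x => x) false = alt_rotations w := by
  rw [genA_eq, altB_eq]

lemma mem_alt_iff_isRotated (u x : String) :
    x ∈ alt_rotations u ↔ u.toList ~r x.toList := by
  rw [altB_eq, PySem.List.mem_sorted]
  rcases Nat.eq_zero_or_pos u.toList.length with h0 | hpos
  · have hu : u.toList = [] := List.length_eq_zero_iff.mp h0
    rw [if_pos h0, List.mem_singleton]
    constructor
    · rintro rfl; exact List.IsRotated.refl _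
    · intro h
      have hxl : x.toList = u.toList := by
        rw [hu] at h ⊢
        exact List.isRotated_nil_iff.mp h.symm
      exact String.toList_inj.mp hxl
  · rw [if_neg (by omega)]
    unfold rotBase
    simp only [List.mem_map, List.mem_range]
    constructor
    · rintro ⟨i, hi, rfl⟩
      rw [String.toList_ofList]
      exact ⟨i, rfl⟩
    · intro h
      rcases List.isRotated_iff_mod.mp h with ⟨i, hi, hrot⟩
      rcases Nat.lt_or_ge i u.toList.length with hlt | hge
      · exact ⟨i, hlt, (String.toList_inj.mp (by rw [String.toList_ofList, hrot])).symm⟩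
      · have hieq : i = u.toList.length := le_antisymm hi hge
        refine ⟨0, hpos, ?_⟩
        apply (String.toList_inj.mp _).symm
        rw [String.toList_ofList, List.rotate_zero, ← hrot, hieq, List.rotate_length]

lemma alt_ne_nil (w : String) : alt_rotations w ≠ [] := by
  rw [altB_eq]
  intro h
  have hl := PySem.List.length_sorted (if w.toList.length = 0 then [w] else rotBase w)
    (fun x : String => x) false
  rw [h] at hl
  rcases Nat.eq_zero_or_pos w.toList.length with h0 | hpos
  · rw [if_pos h0] at hl; simp at hl
  · rw [if_neg (Nat.pos_iff_ne_zero.mp hpos)] at hl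
    unfold rotBase at hl
    simp at hl
    rw [hl] at hpos
    simp at hpos

lemma rotKey_cons (w : String) : alt_rotations w = rotKey w :: (alt_rotations w).tail := by
  rcases h : alt_rotations w with _ | ⟨a, t⟩
  · exact absurd h (alt_ne_nil w)
  · unfold rotKey
    rw [h, PySem.List.pyGetD_zero]
    rfl

lemma rotKey_mem (w : String) : rotKey w ∈ alt_rotations w := by
  rw [rotKey_cons w]; exact List.mem_cons_self

lemma rotKey_min (w : String) : ∀ y ∈ alt_rotations w, rotKey w ≤ y := by
  intro y hy
  have hform := (altB_eq w) ▸ (rotKey_cons w)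
  apply PySem.List.key_head_sorted_le _ (fun x : String => x) hform y
  rw [← PySem.List.mem_sorted _ (fun x : String => x) false, ← altB_eq]
  exact hy

lemma rotKey_congr (u w : String) (h : u.toList ~r w.toList) : rotKey u = rotKey w := by
  have hmem : ∀ x, x ∈ alt_rotations u ↔ x ∈ alt_rotations w := by
    intro x
    rw [mem_alt_iff_isRotated, mem_alt_iff_isRotated]
    exact ⟨fun hx => h.symm.trans hx, fun hx => h.trans hx⟩
  have h1 : rotKey u ≤ rotKey w :=
    rotKey_min u (rotKey w) ((hmem (rotKey w)).mpr (rotKey_mem w))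
  have h2 : rotKey w ≤ rotKey u :=
    rotKey_min w (rotKey u) ((hmem (rotKey u)).mp (rotKey_mem u))
  exact le_antisymm h1 h2

lemma mem_alt_iff_key (u x : String) :
    x ∈ alt_rotations u ↔ rotKey x = rotKey u := by
  constructor
  · intro h
    exact rotKey_congr x u ((mem_alt_iff_isRotated u x).mp h).symm
  · intro h
    have hu : u.toList ~r (rotKey u).toList := (mem_alt_iff_isRotated u _).mp (rotKey_mem u)
    have hx : x.toList ~r (rotKey x).toList := (mem_alt_iff_isRotated x _).mp (rotKey_mem x)
    rw [mem_alt_iff_isRotated]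
    exact hu.trans (h ▸ hx).symm

lemma group_member_iff (res : List (List String)) (w : String) :
    group_member res w = true ↔ ∃ g ∈ res, w ∈ g := by
  induction res with
  | nil => simp [group_member]
  | cons g gs ih =>
      unfold group_member
      by_cases hw : w ∈ g <;> simp [hw, ih]

lemma stepA_eq (res : List (List String)) (w : String) :
    stepA res w = if group_member res w then res else res ++ [alt_rotations w] := by
  unfold stepA
  rw [sortedA_eq_altB]
  cases res with
  | nil => simp [group_member]
  | cons g gs => simp

lemma loop_eq (lis : List String) (res : List (List String)) (seen : PySem.Set String)
    (hinv : ∀ x, group_member res x = true ↔ seen.contains (rotKey x) = true) :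
    lis.foldl stepA res = (lis.foldl stepB (seen, res)).2 := by
  induction lis generalizing res seen with
  | nil => rfl
  | cons word rest ih =>
      simp only [List.foldl_cons]
      rw [stepA_eq]
      by_cases hc : seen.contains (rotKey word) = true
      · rw [if_pos ((hinv word).mpr hc)]
        have hB : stepB (seen, res) word = (seen, res) := by
          show (if seen.contains (rotKey word) then (seen, res)
            else (seen.add (rotKey word), res ++ [alt_rotations word])) = (seen, res)
          rw [if_pos hc]
        rw [hB]
        exact ih res seen hinv
      · rw [if_neg (by rw [hinv word]; exact hc)]
        have hB : stepB (seen, res) word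
            = (seen.add (rotKey word), res ++ [alt_rotations word]) := by
          show (if seen.contains (rotKey word) then (seen, res)
            else (seen.add (rotKey word), res ++ [alt_rotations word]))
            = (seen.add (rotKey word), res ++ [alt_rotations word])
          rw [if_neg hc]
        rw [hB]
        apply ih
        intro x
        rw [group_member_iff, PySem.Set.contains_iff, PySem.Set.mem_add]
        constructor
        · rintro ⟨g, hg, hx⟩
          rcases List.mem_append.mp hg with hg | hg
          · exact Or.inl (PySem.Set.contains_iff seen (rotKey x) |>.mp
              ((hinv x).mp ((group_member_iff res x).mpr ⟨g, hg, hx⟩)))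
          · rw [List.mem_singleton] at hg
            subst hg
            exact Or.inr ((mem_alt_iff_key word x).mp hx)
        · rintro (hs | hk)
          · rcases (group_member_iff res x).mp
              ((hinv x).mpr ((PySem.Set.contains_iff seen (rotKey x)).mpr hs)) with ⟨g, hg, hx⟩
            exact ⟨g, List.mem_append.mpr (Or.inl hg), hx⟩
          · exact ⟨alt_rotations word, List.mem_append.mpr (Or.inr (List.mem_singleton.mpr rfl)),
              (mem_alt_iff_key word x).mpr hk⟩

-- ===== VERDICT (by name: the statement is the Claim_ definition above) =====
theorem group_rotated_words_spec : Claim_equal_group_rotated_words := by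
  intro lis _
  unfold Spec_group_rotated_words group_rotated_words group_rotated_words_alt
  have hA : (fun (result : List (List String)) (word : String) =>
      if result.length = 0 then
        result ++ [PySem.List.sorted (generate_rotated_words word) (fun x => x) false]
      else if group_member result word then result
      else result ++ [PySem.List.sorted (generate_rotated_words word) (fun x => x) false]) = stepA := rfl
  have hB : (fun (st : PySem.Set String × List (List String)) (word : String) =>
      let rots := alt_rotations word
      let key := PySem.List.pyGetD rots 0 ""
      if st.1.contains key then st else (st.1.add key, st.2 ++ [rots])) = stepB := rfl
  rw [hA, hB]
  apply loop_eq
  intro x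
  simp [group_member, PySem.Set.empty]
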